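-- pv_equiv track=rewrite | github.com/lscatfish/TensorLearning | core/base.py | check_feed_dict
-- ===== SOURCE A (Python) =====
-- def check_feed_dict(feed_dict: dict) -> bool:
--     """校验批量数据的批次大小是否统一"""
--     batch_size = -1
--     for k in feed_dict:
--         if batch_size == -1:
--             batch_size = len(feed_dict[k])
--         elif batch_size != len(feed_dict[k]):
--             return False
--     return True
-- ===== SOURCE B (Python) =====
-- def check_feed_dict(feed_dict: dict) -> bool:
--     """校验批量数据的批次大小是否统一"""
--     return len({len(v) for v in feed_dict.values()}) <= 1
-- ===== Notes on version B (the rewrite author's own statement) =====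
-- stated objective: idiomatic
-- what changed: Replaces the running-sentinel loop with an early return by an aggregate: collect the distinct value lengths into a set and test that at most one distinct length exists.
import Mathlib
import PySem

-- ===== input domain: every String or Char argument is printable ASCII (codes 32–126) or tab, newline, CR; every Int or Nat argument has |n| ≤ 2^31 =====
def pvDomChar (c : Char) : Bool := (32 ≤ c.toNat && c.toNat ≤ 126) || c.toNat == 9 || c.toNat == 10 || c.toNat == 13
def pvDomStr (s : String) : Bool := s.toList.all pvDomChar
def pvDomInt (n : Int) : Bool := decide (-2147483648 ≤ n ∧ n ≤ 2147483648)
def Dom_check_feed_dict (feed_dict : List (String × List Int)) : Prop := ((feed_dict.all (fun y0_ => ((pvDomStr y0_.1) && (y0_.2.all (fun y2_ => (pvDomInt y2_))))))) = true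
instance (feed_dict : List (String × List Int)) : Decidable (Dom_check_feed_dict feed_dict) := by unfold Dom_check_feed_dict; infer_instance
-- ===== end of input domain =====

-- B collects the distinct value lengths into a set and tests that at most one exists; A keeps a
-- running batch_size with early exit. Header objective: idiomatic aggregate instead of sentinel loop.

-- ===== PORT A =====
-- 'for k in feed_dict: … feed_dict[k] …' — keys in insertion order, value by first-match lookup.
def cfdLoop (d : List (String × List Int)) (bs : Int) : List String → Bool
  | [] => true
  | k :: ks =>
    let l : Int := (((PySem.Dict.mk d).getD k []).length : Int)
    if bs == -1 then cfdLoop d l ks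
    else if bs != l then false
    else cfdLoop d bs ks

def check_feed_dict (feed_dict : List (String × List Int)) : Bool :=
  cfdLoop feed_dict (-1) (feed_dict.map Prod.fst)

-- ===== PORT B =====
def check_feed_dict_alt (feed_dict : List (String × List Int)) : Bool :=
  decide ((PySem.Set.ofList (feed_dict.map (fun p => (p.2.length : Int)))).length ≤ 1)

-- ===== PRECONDITION & SPEC =====
-- Pre_ excludes association lists with duplicate keys: a Python dict cannot contain them, so no
-- such input ever reaches A.
def Pre_check_feed_dict (feed_dict : List (String × List Int)) : Prop :=
  (feed_dict.map Prod.fst).Nodup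
instance (feed_dict : List (String × List Int)) : Decidable (Pre_check_feed_dict feed_dict) := by
  unfold Pre_check_feed_dict; infer_instance
def pvWitness_check_feed_dict : (List (String × List Int)) := [("a", [1, 2]), ("b", [3, 4])]

def Spec_check_feed_dict (feed_dict : List (String × List Int)) (out : Bool) : Prop := out = check_feed_dict_alt feed_dict
instance (feed_dict : List (String × List Int)) (out : Bool) : Decidable (Spec_check_feed_dict feed_dict out) := by unfold Spec_check_feed_dict; infer_instance

-- ===== CLAIM (what is proved, stated in full; the proofs are below) =====
def Claim_equal_check_feed_dict : Prop := ∀ (feed_dict : List (String × List Int)), Dom_check_feed_dict feed_dict → Pre_check_feed_dict feed_dict → Spec_check_feed_dict feed_dict (check_feed_dict feed_dict)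

-- ===== LEMMAS AND PROOFS =====

-- Under Nodup keys, looking a key of d up in d returns that pair's value.
theorem cfd_lookup_self (d : List (String × List Int))
    (hnd : (d.map Prod.fst).Nodup) (p : String × List Int) (hp : p ∈ d) :
    (PySem.Dict.mk d).getD p.1 [] = p.2 := by
  induction d with
  | nil => cases hp
  | cons q rest ih =>
    obtain ⟨qk, qv⟩ := q
    simp only [List.map_cons, List.nodup_cons] at hnd
    rcases List.mem_cons.mp hp with h | h
    · subst h
      simp [PySem.Dict.getD, PySem.Dict.get?_mk_cons]
    · have hne : qk ≠ p.1 := by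
        intro he; exact hnd.1 (he ▸ List.mem_map_of_mem h)
      have : (PySem.Dict.mk ((qk, qv) :: rest)).get? p.1 = (PySem.Dict.mk rest).get? p.1 := by
        rw [PySem.Dict.get?_mk_cons]
        simp [hne]
      simp only [PySem.Dict.getD, this]
      exact ih hnd.2 h

-- The pure loop over the list of lengths.
def goA (bs : Int) : List Int → Bool
  | [] => true
  | l :: ls => if bs == -1 then goA l ls else if bs != l then false else goA bs ls

theorem cfdLoop_eq_goA (d : List (String × List Int))
    (hnd : (d.map Prod.fst).Nodup) :
    ∀ (sub : List (String × List Int)) (bs : Int), (∀ p ∈ sub, p ∈ d) →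
      cfdLoop d bs (sub.map Prod.fst) = goA bs (sub.map (fun p => (p.2.length : Int))) := by
  intro sub
  induction sub with
  | nil => intro bs _; rfl
  | cons p rest ih =>
    intro bs hsub
    have hlk := cfd_lookup_self d hnd p (hsub p (by simp))
    have hrest : ∀ q ∈ rest, q ∈ d := fun q hq => hsub q (by simp [hq])
    simp only [List.map_cons, cfdLoop, goA, hlk]
    split
    · exact ih _ hrest
    · split
      · rfl
      · exact ih _ hrest

theorem goA_all (l : Int) (hl : 0 ≤ l) :
    ∀ ls : List Int, (∀ x ∈ ls, (0:Int) ≤ x) →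
      goA l ls = ls.all (fun x => x == l) := by
  intro ls
  induction ls with
  | nil => intro _; rfl
  | cons x xs ih =>
    intro hx
    have h1 : (l == -1) = false := by simp; omega
    simp only [goA, h1, List.all_cons]
    by_cases hxl : l = x
    · subst hxl
      simp [ih (fun y hy => hx y (by simp [hy]))]
    · simp [bne, hxl]
      exact fun h => absurd h.symm hxl

theorem set_len_le_one (ls : List Int) :
    (decide ((PySem.Set.ofList ls).length ≤ 1)) =
      (match ls with
       | [] => true
       | l :: rest => rest.all (fun x => x == l)) := by
  cases ls with
  | nil => simp [PySem.Set.ofList_nil]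
  | cons l rest =>
    rw [PySem.Set.ofList_cons]
    by_cases h : ∀ x ∈ rest, x = l
    · have hd : PySem.Set.discard (PySem.Set.ofList rest) l = [] := by
        have : ∀ x ∈ PySem.Set.ofList rest, x = l := fun x hx =>
          h x ((PySem.Set.mem_ofList _ _).mp hx)
        rcases List.eq_nil_or_concat (PySem.Set.discard (PySem.Set.ofList rest) l) with he | ⟨_, y, hy⟩
        · exact he
        · exfalso
          have hy' : y ∈ PySem.Set.discard (PySem.Set.ofList rest) l := by simp [hy]
          rw [PySem.Set.mem_discard] at hy'
          exact hy'.2 (this y hy'.1)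
      rw [hd]
      simp only [List.length_cons, List.length_nil]
      have : rest.all (fun x => x == l) = true := by
        simp only [List.all_eq_true]
        intro x hx; exact beq_iff_eq.mpr (h x hx)
      simp [this]
    · push_neg at h
      obtain ⟨x, hx, hxl⟩ := h
      have hmem : x ∈ PySem.Set.discard (PySem.Set.ofList rest) l := by
        rw [PySem.Set.mem_discard]
        exact ⟨(PySem.Set.mem_ofList _ _).mpr hx, hxl⟩
      have hlen : 1 ≤ (PySem.Set.discard (PySem.Set.ofList rest) l).length :=
        List.length_pos_of_mem hmem
      have hall : rest.all (fun x => x == l) = false := by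
        rw [List.all_eq_false]
        exact ⟨x, hx, by simp [hxl]⟩
      simp only [hall, List.length_cons, decide_eq_false_iff_not]
      omega

-- ===== VERDICT (by name: the statement is the Claim_ definition above) =====
theorem check_feed_dict_spec : Claim_equal_check_feed_dict := by
  intro d _ hpre
  unfold Spec_check_feed_dict check_feed_dict check_feed_dict_alt
  rw [cfdLoop_eq_goA d hpre d (-1) (fun _ h => h)]
  rw [set_len_le_one]
  cases hd : d.map (fun p => (p.2.length : Int)) with
  | nil => rfl
  | cons l rest =>
    have hl : 0 ≤ l := by
      have : l ∈ d.map (fun p => (p.2.length : Int)) := by rw [hd]; simp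
      obtain ⟨p, _, hp⟩ := List.mem_map.mp this
      omega
    have hrest : ∀ x ∈ rest, (0:Int) ≤ x := by
      intro x hx
      have : x ∈ d.map (fun p => (p.2.length : Int)) := by rw [hd]; simp [hx]
      obtain ⟨p, _, hp⟩ := List.mem_map.mp this
      omega
    have h1 : ((-1 : Int) == -1) = true := by simp
    simp only [goA, h1, if_true]
    exact goA_all l hl rest hrest
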